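-- pv_equiv track=rewrite | github.com/ziedouaghlani/simple-python | unbonvieuxpendu/fonctions.py | recupmotmasque
-- ===== SOURCE A (Python) =====
-- def recupmotmasque(motcomplet, lettrestrouvees):
--     """
--     Cette fonction renvoie un mot masqué tout ou en partie, en fonction :
--     - du mot d'origine (type str)
--     - des lettres déjà trouvées (type list)
--     On renvoie le mot d'origine avec des * remplaçant les lettres que l'on
--     n'a pas encore trouvées.
--     """
--     motmasque = ""
--     for lettre in motcomplet:
--         if lettre in lettrestrouvees:
--             motmasque += lettre
--         else:
--             motmasque += "*"
--     return motmasque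
-- ===== SOURCE B (Python) =====
-- def recupmotmasque(motcomplet, lettrestrouvees):
--     table = {ord(c): "*" for c in motcomplet if c not in lettrestrouvees}
--     return motcomplet.translate(table)
-- ===== Notes on version B (the rewrite author's own statement) =====
-- stated objective: idiomatic
-- what changed: Replaces the per-character branch-and-concatenate loop by building a translation table (ord of each not-yet-found character mapped to '*') once and applying str.translate in a single pass.
import Mathlib
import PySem

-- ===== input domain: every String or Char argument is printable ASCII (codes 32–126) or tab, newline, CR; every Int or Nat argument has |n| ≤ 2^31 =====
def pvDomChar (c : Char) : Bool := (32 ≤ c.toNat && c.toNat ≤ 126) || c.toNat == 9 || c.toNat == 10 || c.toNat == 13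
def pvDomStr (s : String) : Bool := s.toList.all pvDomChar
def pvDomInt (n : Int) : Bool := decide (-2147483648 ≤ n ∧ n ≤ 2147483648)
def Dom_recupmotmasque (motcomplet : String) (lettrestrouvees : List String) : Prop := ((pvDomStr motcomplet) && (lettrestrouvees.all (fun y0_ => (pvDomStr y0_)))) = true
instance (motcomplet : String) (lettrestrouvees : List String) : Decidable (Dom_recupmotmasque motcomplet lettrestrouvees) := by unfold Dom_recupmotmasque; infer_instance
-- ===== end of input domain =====

-- B builds a translation table (ord of each char of motcomplet not among the found letters ↦ "*")
-- and applies str.translate once, instead of A's per-character branch-and-concatenate loop (objective: idiomatic).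


-- ===== PORT A =====
-- motmasque = ""; for lettre in motcomplet: if lettre in lettrestrouvees: motmasque += lettre else: motmasque += "*"
def recupmotmasque (motcomplet : String) (lettrestrouvees : List String) : String :=
  String.mk (motcomplet.toList.foldl
    (fun motmasque lettre =>
      if lettrestrouvees.contains (String.mk [lettre]) then motmasque ++ [lettre]
      else motmasque ++ ['*'])
    [])

-- ===== PORT B =====
-- table = {ord(c): "*" for c in motcomplet if c not in lettrestrouvees}
def pvTable (motcomplet : String) (lettrestrouvees : List String) : PySem.Dict Int String :=
  motcomplet.toList.foldl
    (fun table c =>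
      if lettrestrouvees.contains (String.mk [c]) then table
      else table.insert ((c.toNat : Int)) "*")
    PySem.Dict.empty

-- return motcomplet.translate(table): each char whose ord is a key is replaced by the mapped string
def recupmotmasque_alt (motcomplet : String) (lettrestrouvees : List String) : String :=
  let table := pvTable motcomplet lettrestrouvees
  String.mk ((motcomplet.toList.map (fun c =>
    match table.get? ((c.toNat : Int)) with
    | some s => s.toList
    | none => [c])).flatten)

-- ===== PRECONDITION & SPEC =====
def Spec_recupmotmasque (motcomplet : String) (lettrestrouvees : List String) (out : String) : Prop := out = recupmotmasque_alt motcomplet lettrestrouvees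
instance (motcomplet : String) (lettrestrouvees : List String) (out : String) : Decidable (Spec_recupmotmasque motcomplet lettrestrouvees out) := by unfold Spec_recupmotmasque; infer_instance

-- ===== CLAIM (what is proved, stated in full; the proofs are below) =====
def Claim_equal_recupmotmasque : Prop := ∀ (motcomplet : String) (lettrestrouvees : List String), Dom_recupmotmasque motcomplet lettrestrouvees → Spec_recupmotmasque motcomplet lettrestrouvees (recupmotmasque motcomplet lettrestrouvees)

-- ===== LEMMAS AND PROOFS =====

theorem pv_key_inj {c c' : Char} (h : (c.toNat : Int) = (c'.toNat : Int)) : c = c' := by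
  apply Char.ext
  exact UInt32.toNat_inj.mp (Int.ofNat.inj h)

-- lookup in a table built by the filtered insert loop
theorem pv_tbl_get (memb : Char → Bool) (xs : List Char) (d : PySem.Dict Int String) (k : Int) :
    (xs.foldl (fun t c => if memb c then t else t.insert ((c.toNat : Int)) "*") d).get? k
      = if ∃ c ∈ xs, memb c = false ∧ (c.toNat : Int) = k then some "*" else d.get? k := by
  induction xs generalizing d with
  | nil => simp
  | cons c xs ih =>
    simp only [List.foldl_cons]
    by_cases hm : memb c
    · rw [if_pos hm, ih]
      have hiff : (∃ c' ∈ c :: xs, memb c' = false ∧ ((c'.toNat : Int)) = k)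
          ↔ (∃ c' ∈ xs, memb c' = false ∧ ((c'.toNat : Int)) = k) := by
        constructor
        · rintro ⟨c', hmem, hf, hk⟩
          rcases List.mem_cons.mp hmem with rfl | h'
          · rw [hm] at hf; cases hf
          · exact ⟨c', h', hf, hk⟩
        · rintro ⟨c', h', hf, hk⟩
          exact ⟨c', List.mem_cons_of_mem _ h', hf, hk⟩
      rw [if_congr hiff rfl rfl]
    · rw [if_neg hm, ih]
      have hmf : memb c = false := by simpa using hm
      by_cases hx : ∃ c' ∈ xs, memb c' = false ∧ ((c'.toNat : Int)) = k
      · rw [if_pos hx]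
        obtain ⟨c', h', hf, hk⟩ := hx
        rw [if_pos ⟨c', List.mem_cons_of_mem _ h', hf, hk⟩]
      · rw [if_neg hx, PySem.Dict.get?_insert]
        by_cases hk : k = ((c.toNat : Int))
        · rw [if_pos hk, if_pos ⟨c, List.mem_cons_self, hmf, hk.symm⟩]
        · rw [if_neg hk]
          have hno : ¬ ∃ c' ∈ c :: xs, memb c' = false ∧ ((c'.toNat : Int)) = k := by
            rintro ⟨c', hmem, hf, hke⟩
            rcases List.mem_cons.mp hmem with rfl | h'
            · exact hk hke.symm
            · exact hx ⟨c', h', hf, hke⟩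
          rw [if_neg hno]

theorem pv_a_eq_flatMap (p : Char → Bool) (xs : List Char) :
    xs.foldl (fun acc c => if p c then acc ++ [c] else acc ++ ['*']) []
      = xs.flatMap (fun c => if p c then [c] else ['*']) := by
  have h : (fun (acc : List Char) c => if p c then acc ++ [c] else acc ++ ['*'])
      = fun acc c => acc ++ (if p c then [c] else ['*']) := by
    funext acc c; split <;> rfl
  rw [h, PySem.List.foldl_append_eq_flatMap]
  simp

theorem recupmotmasque_spec : Claim_equal_recupmotmasque := by
  intro mot ls _
  unfold Spec_recupmotmasque recupmotmasque recupmotmasque_alt pvTable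
  rw [pv_a_eq_flatMap (fun c => ls.contains (String.mk [c])) mot.toList]
  simp only [List.flatMap_def]
  congr 1
  congr 1
  apply List.map_congr_left
  intro c hc
  rw [pv_tbl_get (fun c => ls.contains (String.mk [c])) mot.toList PySem.Dict.empty ((c.toNat : Int))]
  by_cases hm : ls.contains (String.mk [c])
  · have hno : ¬ ∃ c' ∈ mot.toList, (ls.contains (String.mk [c']) : Bool) = false ∧ ((c'.toNat : Int)) = ((c.toNat : Int)) := by
      rintro ⟨c', _, hf, hke⟩
      rw [pv_key_inj hke, hm] at hf
      cases hf
    rw [if_neg hno, if_pos hm, PySem.Dict.get?_empty]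
  · have hyes : ∃ c' ∈ mot.toList, (ls.contains (String.mk [c']) : Bool) = false ∧ ((c'.toNat : Int)) = ((c.toNat : Int)) :=
      ⟨c, hc, by simpa using hm, rfl⟩
    rw [if_pos hyes, if_neg hm]
    rfl
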